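-- pv_equiv track=rewrite | github.com/Bukurov/all | Постоянная Капрекара.py | get_big_small
-- ===== SOURCE A (Python) =====
-- def get_big_small(number):
--     list_diget = list(map(int,str(number)))
--     while len(list_diget) < 4:
--         list_diget.insert(0,0)
--     big = list(list_diget)#6000
--     big.sort()#0006
--     small = list(big)#0006
--     big.reverse()#6000
--     big ,small = list(map(str,big)),list(map(str,small))
--     big = int(''.join(big))
--     small = int(''.join(small))
--     return big,small
-- ===== SOURCE B (Python) =====
-- def get_big_small(number):
--     cnt = [0] * 10
--     total = 0
--     for ch in str(number):
--         cnt[int(ch)] += 1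
--         total += 1
--     if total < 4:
--         cnt[0] += 4 - total
--     big = int(''.join(str(d) * cnt[d] for d in range(9, -1, -1)))
--     small = int(''.join(str(d) * cnt[d] for d in range(10)))
--     return big, small
-- ===== Notes on version B (the rewrite author's own statement) =====
-- stated objective: alternative
-- what changed: Replaces A's build-list/pad/sort/copy/reverse pipeline by a counting sort: one pass builds a digit histogram cnt[0..9] (the padding shortfall is added to cnt[0]), and big/small are emitted directly from the counts in descending/ascending digit order.
import Mathlib
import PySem

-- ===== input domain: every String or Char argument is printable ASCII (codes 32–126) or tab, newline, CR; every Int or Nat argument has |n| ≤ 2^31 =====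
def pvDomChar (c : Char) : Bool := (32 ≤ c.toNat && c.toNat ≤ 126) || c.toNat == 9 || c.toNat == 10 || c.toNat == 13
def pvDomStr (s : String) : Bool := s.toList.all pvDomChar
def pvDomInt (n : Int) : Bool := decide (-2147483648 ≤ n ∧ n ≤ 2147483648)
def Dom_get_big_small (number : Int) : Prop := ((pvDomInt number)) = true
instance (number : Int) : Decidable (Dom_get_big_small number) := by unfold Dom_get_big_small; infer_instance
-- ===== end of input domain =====

-- B replaces A's sort-copy-reverse on the padded digit list by a digit histogram
-- (counting sort): count each digit of str(number), add the padding shortfall to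
-- cnt[0], and emit the digits of big/small directly from the counts (objective:
-- alternative algorithm; on fixed-size inputs there is no asymptotic change).

-- int(ch) for a one-character string ch, as both Pythons use it (ValueError = none, excluded by Pre_)
def pyIntOfChar (c : Char) : Int := (PySem.Int.ofChars? [c]).getD 0

-- ===== PORT A =====
-- 'while len(list_diget) < 4: list_diget.insert(0, 0)'
def padZeros (l : List Int) : List Int :=
  if l.length < 4 then padZeros (0 :: l) else l
termination_by 4 - l.length
decreasing_by simp; omega

def get_big_small (number : Int) : Int × Int :=
  let list_diget := (PySem.Int.toChars number).map pyIntOfChar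
  let list_diget := padZeros list_diget
  let big := list_diget
  let big := PySem.List.sorted big (fun x => x) false
  let small := big
  let big := big.reverse
  let bigS := big.map PySem.Int.toChars
  let smallS := small.map PySem.Int.toChars
  ((PySem.Int.ofChars? bigS.flatten).getD 0, (PySem.Int.ofChars? smallS.flatten).getD 0)

-- ===== PORT B =====
-- loop body: 'cnt[int(ch)] += 1; total += 1'
def bStep (st : List Int × Int) (ch : Char) : List Int × Int :=
  let d := pyIntOfChar ch
  (st.1.set d.toNat (st.1.getD d.toNat 0 + 1), st.2 + 1)

def get_big_small_alt (number : Int) : Int × Int :=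
  let s := (PySem.Int.toChars number).foldl bStep (List.replicate 10 0, 0)
  let cnt := if s.2 < 4 then s.1.set 0 (s.1.getD 0 0 + (4 - s.2)) else s.1
  let big := (PySem.Int.ofChars? (((PySem.List.pyRange 9 (-1) (-1)).map
      (fun d => PySem.List.pyRepeat (PySem.Int.toChars d) (cnt.getD d.toNat 0))).flatten)).getD 0
  let small := (PySem.Int.ofChars? (((PySem.List.pyRange 0 10 1).map
      (fun d => PySem.List.pyRepeat (PySem.Int.toChars d) (cnt.getD d.toNat 0))).flatten)).getD 0
  (big, small)

-- ===== PRECONDITION & SPEC =====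
-- A (and B likewise) raises ValueError on negative numbers: int('-') fails; Pre_ keeps the nonnegative inputs.
def Pre_get_big_small (number : Int) : Prop := 0 ≤ number
instance (number : Int) : Decidable (Pre_get_big_small number) := by unfold Pre_get_big_small; infer_instance

def pvWitness_get_big_small : Int := 362

def Spec_get_big_small (number : Int) (out : Int × Int) : Prop := out = get_big_small_alt number
instance (number : Int) (out : Int × Int) : Decidable (Spec_get_big_small number out) := by unfold Spec_get_big_small; infer_instance

-- ===== CLAIM (what is proved, stated in full; the proofs are below) =====
def Claim_equal_get_big_small : Prop := ∀ (number : Int), Dom_get_big_small number → Pre_get_big_small number → Spec_get_big_small number (get_big_small number)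

-- ===== LEMMAS AND PROOFS =====

-- every character Nat.toDigitsCore emits into an accumulator is a decimal digit character
lemma toDigitsCore_mem (fuel : Nat) : ∀ (n : Nat) (ds : List Char) (c : Char),
    c ∈ Nat.toDigitsCore 10 fuel n ds → c ∈ ds ∨ ∃ d : Nat, d < 10 ∧ c = Nat.digitChar d := by
  induction fuel with
  | zero => intro n ds c h; simp [Nat.toDigitsCore] at h; exact Or.inl h
  | succ fuel ih =>
    intro n ds c h
    rw [Nat.toDigitsCore] at h
    by_cases hz : n / 10 = 0
    · rw [if_pos hz] at h
      rcases List.mem_cons.mp h with h | h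
      · exact Or.inr ⟨n % 10, Nat.mod_lt _ (by norm_num), h⟩
      · exact Or.inl h
    · rw [if_neg hz] at h
      rcases ih _ _ _ h with h2 | h2
      · rcases List.mem_cons.mp h2 with h3 | h3
        · exact Or.inr ⟨n % 10, Nat.mod_lt _ (by norm_num), h3⟩
        · exact Or.inl h3
      · exact Or.inr h2

lemma pyIntOfChar_digitChar (d : Nat) (hd : d < 10) : pyIntOfChar (Nat.digitChar d) = (d : Int) := by
  interval_cases d <;> decide

-- the digit list A builds from str(number), number ≥ 0, has all values in 0..9
lemma digs_range (n : Int) (hn : 0 ≤ n) :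
    ∀ v ∈ (PySem.Int.toChars n).map pyIntOfChar, 0 ≤ v ∧ v < 10 := by
  intro v hv
  rcases List.mem_map.mp hv with ⟨c, hc, rfl⟩
  have : c ∈ Nat.toDigits 10 n.toNat := by
    simpa [PySem.Int.toChars, not_lt.mpr hn] using hc
  rcases toDigitsCore_mem _ _ _ _ this with h | ⟨d, hd, rfl⟩
  · simp at h
  · rw [pyIntOfChar_digitChar d hd]; omega

lemma padZeros_eq (l : List Int) : padZeros l = List.replicate (4 - l.length) 0 ++ l := by
  by_cases h : l.length < 4
  · rw [padZeros, if_pos h, padZeros_eq (0 :: l)]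
    have : 4 - l.length = (4 - (0 :: l).length) + 1 := by simp; omega
    rw [this, List.replicate_succ']
    simp
  · rw [padZeros, if_neg h]
    have : 4 - l.length = 0 := by omega
    simp [this]
termination_by 4 - l.length
decreasing_by simp; omega

-- counting-sort correctness: emission from counts is a permutation
lemma emit_perm : ∀ (ds : List Int) (L : List Int), ds.Nodup → (∀ v ∈ L, v ∈ ds) →
    (ds.flatMap (fun d => List.replicate (L.count d) d)).Perm L := by
  intro ds
  induction ds with
  | nil =>
    intro L _ hmem
    have : L = [] := List.eq_nil_iff_forall_not_mem.mpr (fun a ha => by simpa using hmem a ha)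
    simp [this]
  | cons d ds ih =>
    intro L hnd hmem
    have hnd' := (List.nodup_cons.mp hnd).2
    have hdd := (List.nodup_cons.mp hnd).1
    set L' := L.filter (fun x => !(x == d)) with hL'
    have hcounts : ∀ e ∈ ds, L.count e = L'.count e := by
      intro e he
      have hne : e ≠ d := fun h => hdd (h ▸ he)
      rw [hL', List.count_filter]
      simp [hne]
    have hmap : ds.flatMap (fun e => List.replicate (L.count e) e)
        = ds.flatMap (fun e => List.replicate (L'.count e) e) := by
      simp only [List.flatMap]
      congr 1
      exact List.map_congr_left (fun e he => by rw [hcounts e he])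
    have hmem' : ∀ v ∈ L', v ∈ ds := by
      intro v hv
      rcases List.mem_filter.mp hv with ⟨hvL, hvd⟩
      have := hmem v hvL
      simp at hvd
      simpa [hvd] using this
    have e1 : ((d :: ds).flatMap (fun e => List.replicate (L.count e) e))
        = L.filter (fun x => x == d) ++ ds.flatMap (fun e => List.replicate (L'.count e) e) := by
      rw [List.flatMap_cons, List.filter_beq, hmap]
    rw [e1]
    exact (List.Perm.append_left _ (ih L' hnd' hmem')).trans (List.filter_append_perm _ L)

lemma emit_pairwise : ∀ (ds : List Int) (c : Int → Nat), ds.Pairwise (· < ·) →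
    (ds.flatMap (fun d => List.replicate (c d) d)).Pairwise (· ≤ ·) := by
  intro ds c
  induction ds with
  | nil => intro _; simp
  | cons d ds ih =>
    intro hp
    rcases List.pairwise_cons.mp hp with ⟨hlt, hp'⟩
    rw [List.flatMap_cons, List.pairwise_append]
    refine ⟨List.pairwise_replicate_of_refl, ih hp', ?_⟩
    intro a ha b hb
    rcases List.mem_flatMap.mp hb with ⟨e, he, hbe⟩
    rw [List.eq_of_mem_replicate ha, List.eq_of_mem_replicate hbe]
    exact le_of_lt (hlt e he)

lemma counting_sort (L : List Int) (h : ∀ v ∈ L, 0 ≤ v ∧ v < 10) :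
    PySem.List.sorted L (fun x => x) false
      = ([0,1,2,3,4,5,6,7,8,9] : List Int).flatMap (fun d => List.replicate (L.count d) d) := by
  apply PySem.List.eq_of_perm_of_pairwise_le_of_injective (fun x => x) Function.injective_id
  · refine (PySem.List.sorted_perm L (fun x => x) false).trans ?_
    refine (emit_perm _ L (by decide) ?_).symm
    intro v hv
    have := h v hv
    simp only [List.mem_cons, List.not_mem_nil, or_false]
    omega
  · exact PySem.List.sorted_pairwise L (fun x => x)
  · exact emit_pairwise _ _ (by decide)

-- invariant of B's counting loop
lemma fold_cnt : ∀ (cs : List Char) (cnt : List Int) (t : Int), cnt.length = 10 →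
    (∀ ch ∈ cs, 0 ≤ pyIntOfChar ch ∧ pyIntOfChar ch < 10) →
    (cs.foldl bStep (cnt, t)).1.length = 10 ∧
    (cs.foldl bStep (cnt, t)).2 = t + cs.length ∧
    ∀ k : Nat, k < 10 →
      (cs.foldl bStep (cnt, t)).1.getD k 0 = cnt.getD k 0 + ((cs.map pyIntOfChar).count (k : Int) : Int) := by
  intro cs
  induction cs with
  | nil => intro cnt t hlen _; simp [hlen]
  | cons c cs ih =>
    intro cnt t hlen hr
    have hc := hr c (List.mem_cons_self ..)
    set d := pyIntOfChar c with hd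
    have hdn : d.toNat < 10 := by omega
    have hset : (cnt.set d.toNat (cnt.getD d.toNat 0 + 1)).length = 10 := by simp [hlen]
    have hgetD : ∀ k : Nat, k < 10 →
        (cnt.set d.toNat (cnt.getD d.toNat 0 + 1)).getD k 0
          = cnt.getD k 0 + (if d.toNat = k then 1 else 0) := by
      intro k hk
      rcases eq_or_ne d.toNat k with he | hne
      · subst he
        rw [List.getD_eq_getElem?_getD, List.getElem?_set_self (by omega)]
        simp [List.getD_eq_getElem?_getD]
      · rw [List.getD_eq_getElem?_getD, List.getElem?_set_ne hne, ← List.getD_eq_getElem?_getD]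
        simp [hne]
    obtain ⟨h1, h2, h3⟩ := ih (cnt.set d.toNat (cnt.getD d.toNat 0 + 1)) (t + 1) hset
      (fun ch hch => hr ch (List.mem_cons_of_mem _ hch))
    refine ⟨?_, ?_, ?_⟩
    · simpa [List.foldl_cons, bStep, ← hd] using h1
    · simp only [List.foldl_cons, bStep, ← hd] at h2 ⊢
      rw [h2]; simp; omega
    · intro k hk
      simp only [List.foldl_cons, bStep, ← hd]
      rw [h3 k hk, hgetD k hk]
      simp only [List.map_cons, List.count_cons, ← hd]
      by_cases he : d = (k : Int)
      · simp [he]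
        ring
      · have ht : d.toNat ≠ k := by omega
        simp [he, ht]

-- ===== VERDICT (by name: the statement is the Claim_ definition above) =====
theorem get_big_small_spec : Claim_equal_get_big_small := by
  intro number _hdom hpre
  unfold Spec_get_big_small
  set cs := PySem.Int.toChars number with hcs
  set digs := cs.map pyIntOfChar with hdigs
  have hrange : ∀ v ∈ digs, 0 ≤ v ∧ v < 10 := digs_range number hpre
  have hchars : ∀ ch ∈ cs, 0 ≤ pyIntOfChar ch ∧ pyIntOfChar ch < 10 := by
    intro ch hch
    exact hrange _ (List.mem_map.mpr ⟨ch, hch, rfl⟩)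
  obtain ⟨hL, hT, hK⟩ := fold_cnt cs (List.replicate 10 0) 0 (by simp) hchars
  set s := cs.foldl bStep (List.replicate 10 0, 0) with hs
  have hK' : ∀ k : Nat, k < 10 → s.1.getD k 0 = (digs.count (k : Int) : Int) := by
    intro k hk
    rw [hK k hk]
    have hz : (List.replicate 10 (0:Int)).getD k 0 = 0 := by
      rw [List.getD_eq_getElem?_getD, List.getElem?_replicate]
      simp [hk]
    rw [hz, hdigs]
    simp
  have hT' : s.2 = (digs.length : Int) := by rw [hT]; simp [hdigs]
  set P := padZeros digs with hP
  have hPdef : P = List.replicate (4 - digs.length) 0 ++ digs := padZeros_eq digs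
  have hPrange : ∀ v ∈ P, 0 ≤ v ∧ v < 10 := by
    intro v hv
    rw [hPdef] at hv
    rcases List.mem_append.mp hv with h | h
    · rw [List.eq_of_mem_replicate h]; omega
    · exact hrange v h
  set cnt := if s.2 < 4 then s.1.set 0 (s.1.getD 0 0 + (4 - s.2)) else s.1 with hcnt
  have hCN : ∀ k : Nat, k < 10 → cnt.getD k 0 = (P.count (k : Int) : Int) := by
    intro k hk
    have hPcount : P.count (k : Int) = (if k = 0 then 4 - digs.length else 0) + digs.count (k : Int) := by
      rw [hPdef, List.count_append, List.count_replicate]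
      rcases eq_or_ne k 0 with rfl | hne
      · simp
      · have hz : ¬ (((0:Int) == (k:Int)) = true) := by simp; omega
        simp [hz, hne]
    by_cases hlen : s.2 < 4
    · have hlen' : digs.length < 4 := by rw [hT'] at hlen; exact_mod_cast hlen
      rw [hcnt, if_pos hlen]
      rcases eq_or_ne k 0 with rfl | hne
      · simp only [Nat.zero_lt_succ] at hk
        simp only [reduceIte] at hPcount
        rw [List.getD_eq_getElem?_getD, List.getElem?_set_self (by omega), Option.getD_some]
        rw [hK' 0 (by norm_num), hPcount, hT']
        push_cast
        omega
      · rw [List.getD_eq_getElem?_getD, List.getElem?_set_ne (by omega),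
          ← List.getD_eq_getElem?_getD, hK' k hk, hPcount]
        simp [hne]
    · have hlen' : ¬ digs.length < 4 := by rw [hT'] at hlen; exact_mod_cast hlen
      rw [hcnt, if_neg hlen, hK' k hk, hPcount]
      have : 4 - digs.length = 0 := by omega
      simp [this]
  have hc0 := hCN 0 (by norm_num); have hc1 := hCN 1 (by norm_num)
  have hc2 := hCN 2 (by norm_num); have hc3 := hCN 3 (by norm_num)
  have hc4 := hCN 4 (by norm_num); have hc5 := hCN 5 (by norm_num)
  have hc6 := hCN 6 (by norm_num); have hc7 := hCN 7 (by norm_num)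
  have hc8 := hCN 8 (by norm_num); have hc9 := hCN 9 (by norm_num)
  simp only [List.getD_eq_getElem?_getD, Nat.cast_ofNat, Nat.cast_zero, Nat.cast_one]
    at hc0 hc1 hc2 hc3 hc4 hc5 hc6 hc7 hc8 hc9
  have t2 : (2:Int).toNat = 2 := rfl
  have t3 : (3:Int).toNat = 3 := rfl
  have t4 : (4:Int).toNat = 4 := rfl
  have t5 : (5:Int).toNat = 5 := rfl
  have t6 : (6:Int).toNat = 6 := rfl
  have t7 : (7:Int).toNat = 7 := rfl
  have t8 : (8:Int).toNat = 8 := rfl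
  have t9 : (9:Int).toNat = 9 := rfl
  have hsorted := counting_sort P hPrange
  have hA : get_big_small number =
      (((PySem.Int.ofChars? (((PySem.List.sorted P (fun x => x) false).reverse.map PySem.Int.toChars).flatten)).getD 0),
       ((PySem.Int.ofChars? (((PySem.List.sorted P (fun x => x) false).map PySem.Int.toChars).flatten)).getD 0)) := rfl
  have hB : get_big_small_alt number =
      (((PySem.Int.ofChars? (((PySem.List.pyRange 9 (-1) (-1)).map
          (fun d => PySem.List.pyRepeat (PySem.Int.toChars d) (cnt.getD d.toNat 0))).flatten)).getD 0),
       ((PySem.Int.ofChars? (((PySem.List.pyRange 0 10 1).map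
          (fun d => PySem.List.pyRepeat (PySem.Int.toChars d) (cnt.getD d.toNat 0))).flatten)).getD 0)) := rfl
  rw [hA, hB]
  have hrange9 : PySem.List.pyRange 9 (-1) (-1) = [9,8,7,6,5,4,3,2,1,0] := by decide
  have hrange10 : PySem.List.pyRange 0 10 1 = [0,1,2,3,4,5,6,7,8,9] := by decide
  have hsmall : ((PySem.List.sorted P (fun x => x) false).map PySem.Int.toChars).flatten
      = ((PySem.List.pyRange 0 10 1).map
          (fun d => PySem.List.pyRepeat (PySem.Int.toChars d) (cnt.getD d.toNat 0))).flatten := by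
    rw [hsorted, hrange10]
    simp only [List.flatMap_cons, List.flatMap_nil, List.map_append, List.map_cons, List.map_nil,
      List.map_replicate, List.flatten_append, List.flatten_cons, List.flatten_nil,
      PySem.List.pyRepeat, hc0, hc1, hc2, hc3, hc4, hc5, hc6, hc7, hc8, hc9,
      Int.toNat_natCast, Int.toNat_zero, Int.toNat_one, t2, t3, t4, t5, t6, t7, t8, t9,
      List.append_nil, List.getD_eq_getElem?_getD]
  have hbig : ((PySem.List.sorted P (fun x => x) false).reverse.map PySem.Int.toChars).flatten
      = ((PySem.List.pyRange 9 (-1) (-1)).map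
          (fun d => PySem.List.pyRepeat (PySem.Int.toChars d) (cnt.getD d.toNat 0))).flatten := by
    rw [hsorted, hrange9, List.reverse_flatMap]
    simp only [Function.comp_def, List.reverse_replicate, List.reverse_cons, List.reverse_nil,
      List.nil_append, List.cons_append, List.flatMap_cons, List.flatMap_nil,
      List.map_append, List.map_cons, List.map_nil,
      List.map_replicate, List.flatten_append, List.flatten_cons, List.flatten_nil,
      PySem.List.pyRepeat, hc0, hc1, hc2, hc3, hc4, hc5, hc6, hc7, hc8, hc9,
      Int.toNat_natCast, Int.toNat_zero, Int.toNat_one, t2, t3, t4, t5, t6, t7, t8, t9,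
      List.append_nil, List.getD_eq_getElem?_getD]
  rw [hsmall, hbig]
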